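-- pv_equiv track=rewrite | github.com/TrivShekhar/DSA | Python/Placement Question/Accenture/sumlande.py | ReplaceWithProduct
-- ===== SOURCE A (Python) =====
-- def ReplaceWithProduct(arr):
--     if(arr == None):
--         return None
--     for k,val in enumerate(arr):
--         sl=0
--         sr=0
--         for i in range(k,len(arr)):
--             if(arr[i]<val):
--                 sl+=arr[i]
--             elif(arr[i]>val):
--                 sr+=arr[i]
--         arr[k] = sl*sr
--     return arr
-- ===== SOURCE B (Python) =====
-- def ReplaceWithProduct(arr):
--     # Single right-to-left pass; a dict keeps, for each distinct value seen so far
--     # in the suffix, the total sum of its occurrences, so each step scans the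
--     # distinct values instead of the whole suffix. Does not mutate arr (A does).
--     if arr is None:
--         return None
--     n = len(arr)
--     out = [0] * n
--     sums = {}
--     for k in range(n - 1, -1, -1):
--         v = arr[k]
--         sl = 0
--         sg = 0
--         for u, s in sums.items():
--             if u < v:
--                 sl += s
--             elif u > v:
--                 sg += s
--         out[k] = sl * sg
--         sums[v] = sums.get(v, 0) + v
--     return out
-- ===== Notes on version B (the rewrite author's own statement) =====
-- stated objective: alternative
-- what changed: B replaces A's forward nested suffix scans with a single right-to-left pass that maintains a dict mapping each distinct suffix value to the sum of its occurrences, so each position scans the distinct values seen so far instead of the whole suffix; B also does not mutate arr in place (A does; equivalence is about the return value).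
import Mathlib
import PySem

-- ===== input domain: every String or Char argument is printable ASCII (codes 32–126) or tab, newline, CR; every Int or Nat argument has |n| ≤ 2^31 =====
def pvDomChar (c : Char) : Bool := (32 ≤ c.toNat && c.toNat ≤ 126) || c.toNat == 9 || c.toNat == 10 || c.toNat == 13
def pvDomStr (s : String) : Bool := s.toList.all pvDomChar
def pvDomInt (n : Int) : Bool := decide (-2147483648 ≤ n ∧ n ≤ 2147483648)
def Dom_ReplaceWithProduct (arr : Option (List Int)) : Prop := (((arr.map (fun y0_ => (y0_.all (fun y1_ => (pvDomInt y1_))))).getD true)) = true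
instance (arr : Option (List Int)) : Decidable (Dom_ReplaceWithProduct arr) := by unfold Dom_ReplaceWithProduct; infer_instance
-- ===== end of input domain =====

-- B replaces A's forward nested suffix scans by one right-to-left pass with a dict of
-- per-distinct-value sums; equivalence is about the RETURN value (A mutates arr in place, B does not).

-- ===== PORT A =====
-- outer loop body: 'k,val = enumerate step' reads arr[k] before the body overwrites it;
-- the mutated list is the fold state.
def AbodyRWP (a : List Int) (k : Int) : List Int :=
  let val := PySem.List.pyGetD a k 0
  let f := fun (acc : Int × Int) (x : Int) =>
    if x < val then (acc.1 + x, acc.2)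
    else if x > val then (acc.1, acc.2 + x)
    else acc
  let sls := (PySem.List.pyRange k (a.length : Int) 1).foldl
    (fun acc i => f acc (PySem.List.pyGetD a i 0)) (0, 0)
  PySem.List.pySetD a k (sls.1 * sls.2)

def ReplaceWithProduct (arr : Option (List Int)) : Option (List Int) :=
  match arr with
  | none => none
  | some a0 => some ((PySem.List.pyRange 0 (a0.length : Int) 1).foldl AbodyRWP a0)

-- ===== PORT B =====
-- loop body of B: state = (out, sums); arr itself is never modified.
def BbodyRWP (a : List Int) (st : List Int × PySem.Dict Int Int) (k : Int) :
    List Int × PySem.Dict Int Int :=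
  let v := PySem.List.pyGetD a k 0
  let sls := st.2.items.foldl
    (fun (acc : Int × Int) (us : Int × Int) =>
      if us.1 < v then (acc.1 + us.2, acc.2)
      else if us.1 > v then (acc.1, acc.2 + us.2)
      else acc) (0, 0)
  (PySem.List.pySetD st.1 k (sls.1 * sls.2), st.2.insert v (st.2.getD v 0 + v))

def ReplaceWithProduct_alt (arr : Option (List Int)) : Option (List Int) :=
  match arr with
  | none => none
  | some a =>
    let n : Int := a.length
    some (((PySem.List.pyRange (n - 1) (-1) (-1)).foldl (BbodyRWP a)
      (List.replicate a.length (0 : Int), (PySem.Dict.empty : PySem.Dict Int Int))).1)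

-- ===== PRECONDITION & SPEC =====
def Spec_ReplaceWithProduct (arr : Option (List Int)) (out : Option (List Int)) : Prop := out = ReplaceWithProduct_alt arr
instance (arr : Option (List Int)) (out : Option (List Int)) : Decidable (Spec_ReplaceWithProduct arr out) := by unfold Spec_ReplaceWithProduct; infer_instance

-- ===== CLAIM (what is proved, stated in full; the proofs are below) =====
def Claim_equal_ReplaceWithProduct : Prop := ∀ (arr : Option (List Int)), Dom_ReplaceWithProduct arr → Spec_ReplaceWithProduct arr (ReplaceWithProduct arr)

-- ===== LEMMAS AND PROOFS =====

-- the common specification: position k gets (sum of later-or-equal-index elements < arr[k]) * (sum of those > arr[k])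
def sumLtRWP (xs : List Int) (v : Int) : Int := (xs.filter (fun x => decide (x < v))).sum
def sumGtRWP (xs : List Int) (v : Int) : Int := (xs.filter (fun x => decide (v < x))).sum

def specFRWP : List Int → List Int
  | [] => []
  | v :: rest => (sumLtRWP rest v * sumGtRWP rest v) :: specFRWP rest

-- sum of dict entries (key, s) with p key
def isumLRWP (l : List (Int × Int)) (p : Int → Bool) : Int :=
  ((l.filter (fun us => p us.1)).map Prod.snd).sum

-- A's inner accumulator loop
theorem ainnerRWP (val : Int) : ∀ (xs : List Int) (sl sg : Int),
    xs.foldl (fun (acc : Int × Int) (x : Int) =>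
      if x < val then (acc.1 + x, acc.2)
      else if x > val then (acc.1, acc.2 + x)
      else acc) (sl, sg) = (sl + sumLtRWP xs val, sg + sumGtRWP xs val) := by
  intro xs
  induction xs with
  | nil => intro sl sg; simp [sumLtRWP, sumGtRWP]
  | cons x t ih =>
    intro sl sg
    simp only [List.foldl_cons]
    by_cases h1 : x < val
    · rw [if_pos h1, ih]
      have hx : ¬ (val < x) := by omega
      simp [sumLtRWP, sumGtRWP, List.filter_cons, h1, hx, add_assoc]
    · rw [if_neg h1]
      by_cases h2 : x > val
      · rw [if_pos h2, ih]
        simp [sumLtRWP, sumGtRWP, List.filter_cons, h1, h2, add_assoc]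
      · rw [if_neg h2, ih]
        have hx : ¬ (val < x) := by omega
        simp [sumLtRWP, sumGtRWP, List.filter_cons, h1, hx]

-- B's inner accumulator loop
theorem binnerRWP (v : Int) : ∀ (xs : List (Int × Int)) (sl sg : Int),
    xs.foldl (fun (acc : Int × Int) (us : Int × Int) =>
      if us.1 < v then (acc.1 + us.2, acc.2)
      else if us.1 > v then (acc.1, acc.2 + us.2)
      else acc) (sl, sg)
      = (sl + isumLRWP xs (fun u => decide (u < v)), sg + isumLRWP xs (fun u => decide (v < u))) := by
  intro xs
  induction xs with
  | nil => intro sl sg; simp [isumLRWP]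
  | cons x t ih =>
    intro sl sg
    simp only [List.foldl_cons]
    by_cases h1 : x.1 < v
    · rw [if_pos h1, ih]
      have hx : ¬ (v < x.1) := by omega
      simp [isumLRWP, List.filter_cons, h1, hx, add_assoc]
    · rw [if_neg h1]
      by_cases h2 : x.1 > v
      · rw [if_pos h2, ih]
        have hx : ¬ (x.1 < v) := by omega
        simp [isumLRWP, List.filter_cons, hx, h2, add_assoc]
      · rw [if_neg h2, ih]
        have hx : ¬ (v < x.1) := by omega
        simp [isumLRWP, List.filter_cons, h1, hx]

theorem isumL_consRWP (x : Int × Int) (l : List (Int × Int)) (p : Int → Bool) :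
    isumLRWP (x :: l) p = (if p x.1 then x.2 else 0) + isumLRWP l p := by
  by_cases hp : p x.1 <;> simp [isumLRWP, List.filter_cons, hp]

theorem isumL_appendRWP (l₁ l₂ : List (Int × Int)) (p : Int → Bool) :
    isumLRWP (l₁ ++ l₂) p = isumLRWP l₁ p + isumLRWP l₂ p := by
  simp [isumLRWP, List.filter_append]

-- replacing the (unique) v-entry's value adds dlt to the p-restricted item sum
theorem isumL_replRWP (v dlt : Int) (p : Int → Bool) : ∀ (l : List (Int × Int)),
    (l.map Prod.fst).Nodup → v ∈ l.map Prod.fst →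
    isumLRWP (l.map (fun q => if q.1 == v then (q.1, q.2 + dlt) else q)) p
      = isumLRWP l p + (if p v then dlt else 0) := by
  intro l
  induction l with
  | nil => simp
  | cons q t ih =>
    intro hnd hv
    simp only [List.map_cons, List.nodup_cons, List.mem_cons] at hnd hv
    by_cases hq : q.1 = v
    · have hmap : t.map (fun q => if q.1 == v then (q.1, q.2 + dlt) else q) = t := by
        conv_rhs => rw [← List.map_id t]
        apply List.map_congr_left
        intro r hr
        have hne : r.1 ≠ v := by
          intro h; exact hnd.1 (hq ▸ h ▸ List.mem_map_of_mem hr)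
        simp [hne]
      rw [List.map_cons, hmap, if_pos (by simp [hq]), isumL_consRWP, isumL_consRWP]
      by_cases hp : p v <;> simp [hq, hp] <;> omega
    · have hv' : v ∈ t.map Prod.fst := by
        rcases hv with h | h
        · exact absurd h.symm hq
        · exact h
      rw [List.map_cons, if_neg (by simp [hq]), isumL_consRWP, isumL_consRWP,
        ih hnd.2 hv']
      by_cases hp : p q.1 <;> by_cases hpv : p v <;> simp [hp, hpv] <;> omega

theorem isum_insertRWP (d : PySem.Dict Int Int) (hnd : d.keys.Nodup) (v : Int) (p : Int → Bool) :
    isumLRWP ((d.insert v (d.getD v 0 + v)).items) p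
      = isumLRWP d.items p + (if p v then v else 0) := by
  by_cases hc : d.contains v
  · rw [PySem.Dict.items_insert_of_contains d (d.getD v 0 + v) hc]
    have hmap : d.items.map (fun q => if q.1 == v then (v, d.getD v 0 + v) else q)
        = d.items.map (fun q => if q.1 == v then (q.1, q.2 + v) else q) := by
      apply List.map_congr_left
      intro q hq
      by_cases h : q.1 = v
      · subst h
        have hgd : d.getD q.1 0 = q.2 :=
          PySem.Dict.getD_of_mem_items d (by simpa using hq) hnd 0
        simp [hgd]
      · simp [h]
    rw [hmap]
    refine isumL_replRWP v v p d.items ?_ ?_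
    · simpa [PySem.Dict.keys] using hnd
    · have := (PySem.Dict.contains_iff_mem_keys d v).mp hc
      simpa [PySem.Dict.keys] using this
  · rw [PySem.Dict.items_insert_of_not_contains d (d.getD v 0 + v) (by simpa using hc),
        PySem.Dict.getD_of_not_contains d 0 (by simpa using hc),
        isumL_appendRWP, isumL_consRWP]
    simp [isumLRWP]

-- A's outer loop from position pre.length on state pre ++ suf
theorem aloopRWP : ∀ (suf pre : List Int),
    (PySem.List.pyRange (pre.length : Int) (((pre ++ suf).length : Nat) : Int) 1).foldl AbodyRWP (pre ++ suf)
      = pre ++ specFRWP suf := by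
  intro suf
  induction suf with
  | nil =>
    intro pre
    rw [PySem.List.pyRange_one_eq_nil (by simp)]
    simp [specFRWP]
  | cons v rest ih =>
    intro pre
    have hlt : (pre.length : Int) < (((pre ++ v :: rest).length : Nat) : Int) := by
      simp
    rw [PySem.List.pyRange_one_cons hlt, List.foldl_cons]
    have hval : PySem.List.pyGetD (pre ++ v :: rest) (pre.length : Int) 0 = v := by
      rw [PySem.List.pyGetD_natCast]
      simp [List.getD, List.getElem?_append_right]
    have hbody : AbodyRWP (pre ++ v :: rest) (pre.length : Int)
        = pre ++ (sumLtRWP rest v * sumGtRWP rest v) :: rest := by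
      simp only [AbodyRWP]
      rw [hval,
        PySem.List.foldl_pyRange_pyGetD' (pre ++ v :: rest) 0
          (fun (acc : Int × Int) (x : Int) =>
            if x < v then (acc.1 + x, acc.2)
            else if x > v then (acc.1, acc.2 + x)
            else acc) ((0 : Int), (0 : Int)) (Int.natCast_nonneg _)]
      rw [show ((pre.length : Int)).toNat = pre.length from by simp, List.drop_left,
        List.foldl_cons]
      simp only [lt_self_iff_false, if_false, gt_iff_lt]
      rw [ainnerRWP v rest 0 0, PySem.List.pySetD_natCast]
      simp [List.set_append]
    rw [hbody]
    have hassoc : pre ++ (sumLtRWP rest v * sumGtRWP rest v) :: rest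
        = (pre ++ [sumLtRWP rest v * sumGtRWP rest v]) ++ rest := by simp
    have hstart : (pre.length : Int) + 1
        = ((pre ++ [sumLtRWP rest v * sumGtRWP rest v]).length : Int) := by
      simp
    have hstop : (((pre ++ v :: rest).length : Nat) : Int)
        = ((((pre ++ [sumLtRWP rest v * sumGtRWP rest v]) ++ rest).length : Nat) : Int) := by
      simp
    rw [hassoc, hstart, hstop, ih]
    simp [specFRWP]

-- B's outer loop: invariant over the processed suffix
theorem bloopRWP (l : List Int) : ∀ (pre front suf : List Int) (sums : PySem.Dict Int Int),
    l = pre ++ suf →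
    sums.keys.Nodup →
    (∀ p : Int → Bool, isumLRWP sums.items p = (suf.filter p).sum) →
    front.length = pre.length →
    ((PySem.List.pyRange ((pre.length : Int) - 1) (-1) (-1)).foldl (BbodyRWP l)
        (front ++ specFRWP suf, sums)).1 = specFRWP l := by
  intro pre
  induction pre using List.reverseRecOn with
  | nil =>
    intro front suf sums hl hnd hinv hfl
    rw [PySem.List.pyRange_neg_one_eq_nil (by simp)]
    have hf : front = [] := List.eq_nil_of_length_eq_zero (by simpa using hfl)
    simp [hf, hl]
  | append_singleton pre' v ih =>
    intro front suf sums hl hnd hinv hfl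
    have hl' : l = pre' ++ v :: suf := by simpa using hl
    have hlt : (-1 : Int) < ((pre' ++ [v]).length : Int) - 1 := by simp; omega
    rw [PySem.List.pyRange_neg_one_cons hlt, List.foldl_cons]
    have hk : ((pre' ++ [v]).length : Int) - 1 = (pre'.length : Int) := by simp
    rw [hk]
    rcases List.eq_nil_or_concat front with hfe | ⟨front', x, rfl⟩
    · exfalso; rw [hfe] at hfl; simp at hfl
    have hfl2 : front'.length = pre'.length := by simpa using hfl
    have hval : PySem.List.pyGetD l (pre'.length : Int) 0 = v := by
      rw [hl', PySem.List.pyGetD_natCast]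
      simp [List.getD, List.getElem?_append_right]
    have hbody : BbodyRWP l (front'.concat x ++ specFRWP suf, sums) (pre'.length : Int)
        = (front' ++ specFRWP (v :: suf), sums.insert v (sums.getD v 0 + v)) := by
      simp only [BbodyRWP]
      rw [hval, binnerRWP v sums.items 0 0]
      simp only [zero_add]
      rw [hinv (fun u => decide (u < v)), hinv (fun u => decide (v < u))]
      rw [show (pre'.length : Int) = (front'.length : Int) from by rw [hfl2]]
      rw [PySem.List.pySetD_natCast]
      simp [List.set_append, specFRWP, sumLtRWP, sumGtRWP]
    rw [hbody]
    exact ih front' (v :: suf) (sums.insert v (sums.getD v 0 + v)) hl'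
      (PySem.Dict.nodup_keys_insert sums v _ hnd)
      (by
        intro p
        rw [isum_insertRWP sums hnd v p, hinv p]
        cases hp : p v <;> simp [List.filter_cons, hp] <;> omega)
      hfl2

-- ===== VERDICT (by name: the statement is the Claim_ definition above) =====
theorem ReplaceWithProduct_spec : Claim_equal_ReplaceWithProduct := by
  unfold Claim_equal_ReplaceWithProduct
  intro arr _
  unfold Spec_ReplaceWithProduct
  cases arr with
  | none => rfl
  | some a =>
    simp only [ReplaceWithProduct, ReplaceWithProduct_alt]
    have hA : (PySem.List.pyRange 0 (a.length : Int) 1).foldl AbodyRWP a = specFRWP a := by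
      simpa using aloopRWP a []
    have hB : ((PySem.List.pyRange ((a.length : Int) - 1) (-1) (-1)).foldl (BbodyRWP a)
        (List.replicate a.length (0 : Int), PySem.Dict.empty)).1 = specFRWP a := by
      have h := bloopRWP a a (List.replicate a.length (0 : Int)) [] PySem.Dict.empty
        (by simp) PySem.Dict.nodup_keys_empty (by intro p; rfl) (by simp)
      simpa [specFRWP] using h
    rw [hA, hB]
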